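-- pv_equiv track=rewrite | github.com/jindalpratik/self-learning | Courses/nptel/Programming, Data Structures And Algorithms Using Python/Week 2/assignment.py | primepartition
-- ===== SOURCE A (Python) =====
-- def isprime(k):
--     if k == 1:
--         return False
--     if k == 2 or k == 3:
--         return True
--     for i in range(2, k-1):
--         if k % i == 0:
--             return False
--     return True
--
-- def primepartition(m):
--     if m < 4:
--         return False
--     if isprime(m-2):
--         return True
--     l = 2
--     m -= 2
--     while m > 0:
--         if isprime(l) and isprime(m):
--             return True
--         m -= 1
--         l += 1
--     return False
-- ===== SOURCE B (Python) =====
-- def primepartition(m):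
--     if m < 4:
--         return False
--     sieve = [True] * (m + 1)
--     sieve[0] = False
--     sieve[1] = False
--     i = 2
--     while i * i <= m:
--         for k in range(i, m // i + 1):
--             sieve[i * k] = False
--         i += 1
--     return any(sieve[p] and sieve[m - p] for p in range(2, m - 1))
-- ===== Notes on version B (the rewrite author's own statement) =====
-- stated objective: alternative
-- what changed: A tests each pair (l, m-l) with a fresh trial division inside a pair loop; B builds one sieve of composites (marking multiples i*k for i*i <= m) and then does a single pair scan reading sieve entries.
import Mathlib
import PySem

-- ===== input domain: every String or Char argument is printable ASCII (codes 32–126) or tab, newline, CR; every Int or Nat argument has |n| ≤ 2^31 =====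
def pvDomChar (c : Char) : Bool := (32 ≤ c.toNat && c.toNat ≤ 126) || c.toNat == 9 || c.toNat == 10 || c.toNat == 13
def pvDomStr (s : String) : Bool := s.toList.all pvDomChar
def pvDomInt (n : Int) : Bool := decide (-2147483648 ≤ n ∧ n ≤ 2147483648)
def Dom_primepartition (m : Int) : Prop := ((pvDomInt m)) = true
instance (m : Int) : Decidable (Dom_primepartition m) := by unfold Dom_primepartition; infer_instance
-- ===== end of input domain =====

-- B replaces A's per-pair trial division by one sieve of multiples plus a single pair scan (objective: alternative algorithm).

-- ===== PORT A =====
-- isprime: trial division over range(2, k-1); the early 'return False' is the List.any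
def isprime (k : Int) : Bool :=
  if k = 1 then false
  else if k = 2 ∨ k = 3 then true
  else !((PySem.List.pyRange 2 (k - 1) 1).any (fun i => PySem.Int.mod k i == 0))

-- the 'while m > 0' loop of A's primepartition: pairs (l, m), l increments, m decrements
def ppLoop (l m : Int) : Bool :=
  if 0 < m then
    if isprime l && isprime m then true
    else ppLoop (l + 1) (m - 1)
  else false
termination_by m.toNat
decreasing_by omega

def primepartition (m : Int) : Bool :=
  if m < 4 then false
  else if isprime (m - 2) then true
  else ppLoop 2 (m - 2)

-- ===== PORT B =====
-- inner for-loop: sieve[i*k] = False for k in range(i, m//i + 1); every index i*k is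
-- nonnegative and ≤ m here, so the Python index assignment is exactly List.set at (i*k).toNat
def sieveInner (m i : Int) (s : List Bool) : List Bool :=
  (PySem.List.pyRange i (PySem.Int.floordiv m i + 1) 1).foldl
    (fun s k => s.set (i * k).toNat false) s

-- outer 'while i * i <= m' loop
def sieveLoop (m i : Int) (s : List Bool) : List Bool :=
  if i * i ≤ m then sieveLoop m (i + 1) (sieveInner m i s) else s
termination_by (m + 1 - i).toNat
decreasing_by
  by_cases h0 : i ≤ 0
  · have : (0:Int) ≤ i * i := mul_self_nonneg i
    omega
  · by_cases h1 : i < 2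
    · have : i = 1 := by omega
      subst this; omega
    · have : i ≤ m := by nlinarith
      omega

-- any(sieve[p] and sieve[m-p] for p in range(2, m-1)); both indices lie in [0, m], so
-- Python never raises and getD at the toNat index is exact
def primepartition_alt (m : Int) : Bool :=
  if m < 4 then false
  else
    let s := sieveLoop m 2 (((List.replicate (m + 1).toNat true).set 0 false).set 1 false)
    (PySem.List.pyRange 2 (m - 1) 1).any
      (fun p => s.getD p.toNat false && s.getD (m - p).toNat false)

-- ===== PRECONDITION & SPEC =====
def Spec_primepartition (m : Int) (out : Bool) : Prop := out = primepartition_alt m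
instance (m : Int) (out : Bool) : Decidable (Spec_primepartition m out) := by unfold Spec_primepartition; infer_instance

-- ===== CLAIM (what is proved, stated in full; the proofs are below) =====
def Claim_equal_primepartition : Prop := ∀ (m : Int), Dom_primepartition m → Spec_primepartition m (primepartition m)

-- ===== LEMMAS AND PROOFS =====

-- a proper divisor below n-1 exists iff n is composite (n ≥ 4)
lemma nat_trial_div (n : Nat) (h : 4 ≤ n) :
    (∃ d, 2 ≤ d ∧ d < n - 1 ∧ d ∣ n) ↔ ¬ n.Prime := by
  constructor
  · rintro ⟨d, h2, hlt, hdvd⟩ hp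
    rcases (Nat.Prime.eq_one_or_self_of_dvd hp d hdvd) with rfl | rfl <;> omega
  · intro hp
    obtain ⟨d, hdvd, h2, hlt⟩ := Nat.exists_dvd_of_not_prime2 (by omega) hp
    refine ⟨d, h2, ?_, hdvd⟩
    by_contra hge
    have hd : d = n - 1 := by omega
    subst hd
    have h1 : (n - 1) ∣ n - (n - 1) := Nat.dvd_sub hdvd dvd_rfl
    have he : n - (n - 1) = 1 := by omega
    rw [he] at h1
    have := Nat.le_of_dvd one_pos h1
    omega

-- a factorisation q*k = n with 2 ≤ q ≤ k exists iff n is composite (n ≥ 2)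
lemma nat_sq_factor (n : Nat) (h : 2 ≤ n) :
    (∃ q k, 2 ≤ q ∧ q ≤ k ∧ q * k = n) ↔ ¬ n.Prime := by
  constructor
  · rintro ⟨q, k, h2, hqk, rfl⟩ hp
    rcases (Nat.Prime.eq_one_or_self_of_dvd hp q ⟨k, rfl⟩) with rfl | hq <;> nlinarith
  · intro hp
    refine ⟨n.minFac, n / n.minFac, (Nat.minFac_prime (by omega)).two_le, ?_,
      Nat.mul_div_cancel' n.minFac_dvd⟩
    have hsq : n.minFac ^ 2 ≤ n := Nat.minFac_sq_le_self (by omega) hp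
    have hpos : 0 < n.minFac := Nat.minFac_pos n
    have hmd := Nat.mul_div_cancel' n.minFac_dvd
    nlinarith [Nat.pow_two n.minFac]

lemma int_dvd_toNat {a b : Int} (ha : 0 ≤ a) (hb : 0 ≤ b) : a ∣ b ↔ a.toNat ∣ b.toNat := by
  constructor
  · intro h
    lift a to Nat using ha with x
    lift b to Nat using hb with y
    simpa using Int.ofNat_dvd.mp h
  · intro h
    lift a to Nat using ha with x
    lift b to Nat using hb with y
    simpa using Int.ofNat_dvd.mpr (by simpa using h)

-- A's isprime computes Nat.Prime on positive arguments
lemma isprime_eq (k : Int) (hk : 1 ≤ k) : isprime k = decide (Nat.Prime k.toNat) := by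
  by_cases h1 : k = 1
  · subst h1; simp [isprime, Nat.not_prime_one]
  · by_cases h2 : k = 2
    · subst h2; simp [isprime]; decide
    · by_cases h3 : k = 3
      · subst h3; simp [isprime]; decide
      · have h4 : 4 ≤ k := by omega
        simp only [isprime, if_neg h1, if_neg (show ¬(k = 2 ∨ k = 3) by tauto)]
        rw [Bool.eq_iff_iff]
        have key : (∃ i : Int, 2 ≤ i ∧ i < k - 1 ∧ i ∣ k) ↔ ¬ Nat.Prime k.toNat := by
          rw [← nat_trial_div k.toNat (by omega)]
          constructor
          · rintro ⟨i, hi2, hilt, hdvd⟩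
            exact ⟨i.toNat, by omega, by omega, (int_dvd_toNat (by omega) (by omega)).mp hdvd⟩
          · rintro ⟨d, hd2, hdlt, hdvd⟩
            exact ⟨(d : Int), by omega, by omega,
              (int_dvd_toNat (by omega) (by omega)).mpr (by simpa using hdvd)⟩
        simp only [Bool.not_eq_true', List.any_eq_false, PySem.List.mem_pyRange_one,
          beq_iff_eq, PySem.Int.mod_eq_zero_iff_dvd, decide_eq_true_eq]
        rw [← (not_not (a := Nat.Prime k.toNat)), ← key]
        push Not
        exact ⟨fun h i hi2 hilt hd => h i ⟨hi2, hilt⟩ hd, fun h i hi hd => h i hi.1 hi.2 hd⟩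

-- characterisation of A's while loop
lemma ppLoop_eq (l m : Int) :
    ppLoop l m = true ↔
      ∃ b : Int, 1 ≤ b ∧ b ≤ m ∧ isprime (l + (m - b)) = true ∧ isprime b = true := by
  induction l, m using ppLoop.induct with
  | case1 l m hm hp =>
    rw [ppLoop, if_pos hm, if_pos hp]
    rw [Bool.and_eq_true] at hp
    exact ⟨fun _ => ⟨m, by omega, le_refl m, by simpa using hp.1, hp.2⟩, fun _ => rfl⟩
  | case2 l m hm hp ih =>
    rw [ppLoop, if_pos hm, if_neg hp, ih]
    constructor
    · rintro ⟨b, h1, h2, ha, hb⟩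
      exact ⟨b, h1, by omega, by simpa [show l + 1 + (m - 1 - b) = l + (m - b) by ring] using ha, hb⟩
    · rintro ⟨b, h1, h2, ha, hb⟩
      rcases eq_or_ne b m with rfl | hne
      · exfalso
        apply hp
        have ha' : isprime l = true := by simpa [show l + (b - b) = l by ring] using ha
        simp [ha', hb]
      · exact ⟨b, h1, by omega, by simpa [show l + (m - b) = l + 1 + (m - 1 - b) by ring] using ha, hb⟩
  | case3 l m hm =>
    rw [ppLoop, if_neg hm]
    simp only [Bool.false_eq_true, false_iff]
    rintro ⟨b, h1, h2, -, -⟩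
    omega

-- characterisation of A
lemma primepartition_eq (m : Int) (hm : 4 ≤ m) :
    primepartition m = true ↔
      ∃ b : Int, 2 ≤ b ∧ b ≤ m - 2 ∧ Nat.Prime b.toNat ∧ Nat.Prime (m - b).toNat := by
  have hE : (∃ b : Int, 1 ≤ b ∧ b ≤ m - 2 ∧ isprime (2 + (m - 2 - b)) = true ∧ isprime b = true)
      ↔ (∃ b : Int, 2 ≤ b ∧ b ≤ m - 2 ∧ Nat.Prime b.toNat ∧ Nat.Prime (m - b).toNat) := by
    constructor
    · rintro ⟨b, h1, h2, ha, hb⟩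
      rw [show 2 + (m - 2 - b) = m - b by ring] at ha
      rw [isprime_eq _ (by omega), decide_eq_true_eq] at ha
      rw [isprime_eq _ (by omega), decide_eq_true_eq] at hb
      have hb2 : 2 ≤ b := by have := hb.two_le; omega
      exact ⟨b, hb2, h2, hb, ha⟩
    · rintro ⟨b, h2, hle, pb, pa⟩
      refine ⟨b, by omega, hle, ?_, ?_⟩
      · rw [show 2 + (m - 2 - b) = m - b by ring, isprime_eq _ (by omega), decide_eq_true_eq]
        exact pa
      · rw [isprime_eq _ (by omega), decide_eq_true_eq]
        exact pb
  unfold primepartition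
  rw [if_neg (by omega : ¬ m < 4)]
  by_cases hp : isprime (m - 2) = true
  · rw [if_pos hp]
    have pb : Nat.Prime (m - 2).toNat := by
      rw [isprime_eq _ (by omega), decide_eq_true_eq] at hp; exact hp
    constructor
    · intro _
      refine ⟨m - 2, by omega, le_refl _, pb, ?_⟩
      rw [show m - (m - 2) = 2 by ring]
      exact Nat.prime_two
    · intro _; rfl
  · rw [if_neg hp, ppLoop_eq, hE]

-- getD after a single set-to-false
lemma getD_set_false (s : List Bool) (q p : Nat) :
    ((s.set q false).getD p false) = (s.getD p false && !(q == p)) := by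
  rcases eq_or_ne q p with rfl | h
  · by_cases hp : q < s.length
    · simp [List.getD, List.getElem?_set_self hp]
    · rw [List.set_eq_of_length_le (by omega)]
      simp [List.getD, List.getElem?_eq_none (show s.length ≤ q by omega)]
  · simp [List.getD, List.getElem?_set_ne h, h]

-- getD after folding set-to-false over a list of indices
lemma getD_foldl_set_false (L : List Int) (s : List Bool) (f : Int → Nat) (p : Nat) :
    ((L.foldl (fun s k => s.set (f k) false) s).getD p false)
      = (s.getD p false && !(L.any (fun k => f k == p))) := by
  induction L generalizing s with
  | nil => simp
  | cons a L ih =>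
    rw [List.foldl_cons, ih, getD_set_false]
    simp [Bool.and_assoc]

-- the indices one pass of the inner loop clears
def MarkedBy (m i j : Int) : Prop := ∃ k : Int, i ≤ k ∧ i * k ≤ m ∧ i * k = j

lemma sieveInner_getD (m i j : Int) (s : List Bool) (hi : 2 ≤ i) (hj : 0 ≤ j) :
    ((sieveInner m i s).getD j.toNat false = true)
      ↔ (s.getD j.toNat false = true ∧ ¬ MarkedBy m i j) := by
  unfold sieveInner
  rw [getD_foldl_set_false]
  simp only [Bool.and_eq_true, Bool.not_eq_true', List.any_eq_false,
    PySem.List.mem_pyRange_one, beq_iff_eq]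
  constructor
  · rintro ⟨h1, h2⟩
    refine ⟨h1, ?_⟩
    rintro ⟨k, hk1, hk2, hk3⟩
    have hfl : k ≤ PySem.Int.floordiv m i :=
      (PySem.Int.le_floordiv_iff_mul_le (by omega)).mpr (by rw [mul_comm] at hk2; exact hk2)
    exact h2 k ⟨hk1, by omega⟩ (by omega)
  · rintro ⟨h1, h2⟩
    refine ⟨h1, fun k hk hke => ?_⟩
    have hk0 : 0 ≤ i * k := mul_nonneg (by omega) (by omega)
    have hfl : k ≤ PySem.Int.floordiv m i := by omega
    have hm' : k * i ≤ m := (PySem.Int.le_floordiv_iff_mul_le (by omega)).mp hfl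
    exact h2 ⟨k, hk.1, by rw [mul_comm]; exact hm', by omega⟩

-- the indices the outer loop from i onwards clears
def Marks (m i j : Int) : Prop :=
  ∃ q k : Int, i ≤ q ∧ q * q ≤ m ∧ q ≤ k ∧ q * k ≤ m ∧ q * k = j

lemma sieveLoop_getD (m i j : Int) (s : List Bool) (hi : 2 ≤ i) (hj : 0 ≤ j) :
    ((sieveLoop m i s).getD j.toNat false = true)
      ↔ (s.getD j.toNat false = true ∧ ¬ Marks m i j) := by
  revert hi
  induction i, s using sieveLoop.induct (m := m) with
  | case1 i s h ih =>
    intro hi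
    rw [sieveLoop, if_pos h, ih (by omega), sieveInner_getD m i j s hi hj]
    have hsplit : Marks m i j ↔ (MarkedBy m i j ∨ Marks m (i + 1) j) := by
      constructor
      · rintro ⟨q, k, hq1, hq2, hq3, hq4, hq5⟩
        rcases eq_or_ne q i with rfl | hne
        · exact Or.inl ⟨k, hq3, hq4, hq5⟩
        · exact Or.inr ⟨q, k, by omega, hq2, hq3, hq4, hq5⟩
      · rintro (⟨k, hk1, hk2, hk3⟩ | ⟨q, k, hq1, hq2, hq3, hq4, hq5⟩)
        · exact ⟨i, k, le_refl i, h, hk1, hk2, hk3⟩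
        · exact ⟨q, k, by omega, hq2, hq3, hq4, hq5⟩
    rw [hsplit]
    tauto
  | case2 i s h =>
    intro hi
    rw [sieveLoop, if_neg h]
    have hno : ¬ Marks m i j := by
      rintro ⟨q, k, hq1, hq2, -, -, -⟩
      have : i * i ≤ q * q := mul_le_mul hq1 hq1 (by omega) (by omega)
      omega
    tauto

lemma marks_two (m j : Int) (hj2 : 2 ≤ j) (hjm : j ≤ m) :
    Marks m 2 j ↔ ¬ Nat.Prime j.toNat := by
  rw [← nat_sq_factor j.toNat (by omega)]
  constructor
  · rintro ⟨q, k, hq1, -, hq3, -, hq5⟩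
    refine ⟨q.toNat, k.toNat, by omega, by omega, ?_⟩
    have : (q * k).toNat = q.toNat * k.toNat := Int.toNat_mul (by omega) (by omega)
    omega
  · rintro ⟨q, k, hq2, hqk, hprod⟩
    have hprod' : (q : Int) * (k : Int) = j := by omega
    refine ⟨(q : Int), (k : Int), by omega, ?_, by omega, by omega, hprod'⟩
    have : (q : Int) * q ≤ (q : Int) * k := by
      apply mul_le_mul_of_nonneg_left (by omega) (by omega)
    omega

-- the fresh sieve: true exactly at indices ≥ 2
lemma s0_getD (m j : Int) (hj0 : 0 ≤ j) (hjm : j ≤ m) :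
    ((((List.replicate (m + 1).toNat true).set 0 false).set 1 false).getD j.toNat false = true)
      ↔ 2 ≤ j := by
  rw [getD_set_false, getD_set_false]
  have hrep : (List.replicate (m + 1).toNat true).getD j.toNat false = true := by
    simp [List.getD, show j.toNat < (m + 1).toNat by omega]
  rw [hrep]
  simp only [Bool.true_and, Bool.and_eq_true, Bool.not_eq_true', beq_eq_false_iff_ne]
  omega

-- the finished sieve entry is primality, for indices 0 ≤ j ≤ m
lemma sieve_entry (m j : Int) (hj0 : 0 ≤ j) (hjm : j ≤ m) :
    ((sieveLoop m 2 (((List.replicate (m + 1).toNat true).set 0 false).set 1 false)).getD j.toNat false)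
      = decide (Nat.Prime j.toNat) := by
  rw [Bool.eq_iff_iff, decide_eq_true_eq,
    sieveLoop_getD m 2 j _ (le_refl 2) hj0, s0_getD m j hj0 hjm]
  by_cases hj2 : 2 ≤ j
  · rw [marks_two m j hj2 hjm]
    constructor
    · rintro ⟨-, h⟩; exact not_not.mp h
    · intro h; exact ⟨hj2, not_not.mpr h⟩
  · constructor
    · rintro ⟨h, -⟩; exact absurd h hj2
    · intro h
      exfalso
      have := h.two_le
      omega

-- characterisation of B
lemma primepartition_alt_eq (m : Int) (hm : 4 ≤ m) :
    primepartition_alt m = true ↔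
      ∃ b : Int, 2 ≤ b ∧ b ≤ m - 2 ∧ Nat.Prime b.toNat ∧ Nat.Prime (m - b).toNat := by
  rw [primepartition_alt, if_neg (by omega : ¬ m < 4)]
  simp only [List.any_eq_true, PySem.List.mem_pyRange_one, Bool.and_eq_true]
  constructor
  · rintro ⟨p, ⟨hp2, hplt⟩, h1, h2⟩
    rw [sieve_entry m p (by omega) (by omega), decide_eq_true_eq] at h1
    rw [sieve_entry m (m - p) (by omega) (by omega), decide_eq_true_eq] at h2
    exact ⟨p, hp2, by omega, h1, h2⟩
  · rintro ⟨b, hb2, hble, pb, pa⟩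
    refine ⟨b, ⟨hb2, by omega⟩, ?_, ?_⟩
    · rw [sieve_entry m b (by omega) (by omega), decide_eq_true_eq]; exact pb
    · rw [sieve_entry m (m - b) (by omega) (by omega), decide_eq_true_eq]; exact pa

-- ===== VERDICT (by name: the statement is the Claim_ definition above) =====
theorem primepartition_spec : Claim_equal_primepartition := by
  intro m _
  unfold Spec_primepartition
  by_cases h : m < 4
  · simp [primepartition, primepartition_alt, h]
  · rw [Bool.eq_iff_iff, primepartition_eq m (by omega), ← primepartition_alt_eq m (by omega)]
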